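-- pv_equiv track=rewrite | github.com/naimulhq/recruiting-exercises | src/InventoryAllocator.py | decodeFirstString
-- ===== SOURCE A (Python) =====
-- def decodeFirstString(firstInput):
--     # Iterate through each character in the string.
--     item = [] # Holds the item that is being ordered
--     value = [] # Holds the total number of the specific item being ordered
--
--     # Using the sliding window method to extract the data from the string
--     initialIndex = 0
--     currentIndex = 0
--     while(firstInput[currentIndex] != '}'): # If a closing brace occurs, this indicates end of first string
--         if(firstInput[currentIndex] == ':'): # If a colon occurs, indicates end of item name and beginning of total number of ordered item
--             item.append(firstInput[initialIndex:currentIndex])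
--             initialIndex = currentIndex + 1 # We want initialIndex to start after colon
--             currentIndex += 1 # We want currentIndex to start after colon
--         elif(firstInput[currentIndex] == ","): # If a comma occurs, this indicates that there are more items being ordered.
--             value.append(firstInput[initialIndex:currentIndex])
--             initialIndex = currentIndex + 1 # We want initialIndex to start after comma
--             currentIndex += 1 # We want currentIndex to start after comma
--         else:
--             currentIndex += 1 # If none of the above occurs, increase currentIndex by 1
--
--     value.append(firstInput[initialIndex:currentIndex]) # This ensures last value is obtained since the loop is exited after a closing brace
--     return item,value
-- ===== SOURCE B (Python) =====
-- def decodeFirstString(firstInput):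
--     # Take everything before the first closing brace, then split on ',' into
--     # parts; within each part every ':'-separated token except the last names
--     # an item, and the last token of each part is a value.
--     prefix = firstInput[:firstInput.index('}')]
--     item = []
--     value = []
--     for part in prefix.split(','):
--         tokens = part.split(':')
--         item += tokens[:-1]
--         value.append(tokens[-1])
--     return item, value
-- ===== Notes on version B (the rewrite author's own statement) =====
-- stated objective: idiomatic
-- what changed: Replaces the index-based sliding-window character scan with slicing off the prefix before the first '}' and nested str.split on ',' and ':' (all tokens but the last of each comma-part are items, the last is a value).
import Mathlib
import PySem

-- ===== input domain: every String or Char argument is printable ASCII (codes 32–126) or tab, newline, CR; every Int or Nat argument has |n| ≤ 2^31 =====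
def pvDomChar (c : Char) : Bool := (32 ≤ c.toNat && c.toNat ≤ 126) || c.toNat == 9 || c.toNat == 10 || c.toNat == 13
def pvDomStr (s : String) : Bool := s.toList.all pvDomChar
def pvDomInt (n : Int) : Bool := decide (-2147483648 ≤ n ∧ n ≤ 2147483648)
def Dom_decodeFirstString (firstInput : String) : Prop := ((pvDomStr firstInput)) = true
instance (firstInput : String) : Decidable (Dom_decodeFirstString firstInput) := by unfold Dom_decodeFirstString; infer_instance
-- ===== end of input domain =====

-- B replaces A's index-based sliding-window scan by slicing off the prefix before the
-- first '}' and nested split on ',' and ':' (idiomatic decomposition; same cost).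


-- ===== PORT A =====
-- A's while loop over (initialIndex, currentIndex); fuel bounds the number of steps
-- (inside Pre_ the loop always hits '}' first).  The `none` / fuel-0 cases are the
-- IndexError region (outside Pre_).  The final `value.append(firstInput[initialIndex:
-- currentIndex])` of A is performed in the '}' exit branch, exactly as A does after
-- leaving the loop.
def decodeFirstStringLoop (cs : List Char) :
    Nat → Nat → Nat → List String → List String → List String × List String
  | 0, _, _, item, value => (item, value)
  | fuel + 1, initI, curI, item, value =>
    match PySem.List.pyGet? cs (curI : Int) with
    | none => (item, value)
    | some c =>
      if c = '}' then
        (item, value ++ [String.ofList (PySem.List.slice cs (some (initI : Int)) (some (curI : Int)))])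
      else if c = ':' then
        decodeFirstStringLoop cs fuel (curI + 1) (curI + 1)
          (item ++ [String.ofList (PySem.List.slice cs (some (initI : Int)) (some (curI : Int)))]) value
      else if c = ',' then
        decodeFirstStringLoop cs fuel (curI + 1) (curI + 1)
          item (value ++ [String.ofList (PySem.List.slice cs (some (initI : Int)) (some (curI : Int)))])
      else
        decodeFirstStringLoop cs fuel initI (curI + 1) item value

def decodeFirstString (firstInput : String) : List String × List String :=
  let cs := firstInput.toList
  decodeFirstStringLoop cs (cs.length + 1) 0 0 [] []

-- ===== PORT B =====
def decodeFirstString_alt (firstInput : String) : List String × List String :=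
  let cs := firstInput.toList
  -- prefix = firstInput[:firstInput.index('}')]   (inside Pre_, index = find)
  let pre := PySem.List.slice cs none (some (PySem.Chars.find cs ['}']))
  (PySem.Chars.splitOn pre [',']).foldl
    (fun (acc : List String × List String) part =>
      let tokens := PySem.Chars.splitOn part [':']
      (acc.1 ++ (PySem.List.slice tokens none (some (-1))).map String.ofList,
       acc.2 ++ [String.ofList ((PySem.List.pyGet? tokens (-1)).getD [])]))
    ([], [])

-- ===== PRECONDITION & SPEC =====
-- Pre_ excludes exactly the inputs with no '}', on which A raises IndexError
-- (and B raises ValueError).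
def Pre_decodeFirstString (firstInput : String) : Prop := '}' ∈ firstInput.toList
instance (firstInput : String) : Decidable (Pre_decodeFirstString firstInput) := by
  unfold Pre_decodeFirstString; infer_instance

def pvWitness_decodeFirstString : String := "apple:3,pear:12}"

def Spec_decodeFirstString (firstInput : String) (out : List String × List String) : Prop :=
  out = decodeFirstString_alt firstInput
instance (firstInput : String) (out : List String × List String) :
    Decidable (Spec_decodeFirstString firstInput out) := by
  unfold Spec_decodeFirstString; infer_instance

-- ===== CLAIM (what is proved, stated in full; the proofs are below) =====
def Claim_equal_decodeFirstString : Prop :=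
  ∀ (firstInput : String), Dom_decodeFirstString firstInput →
    Pre_decodeFirstString firstInput →
      Spec_decodeFirstString firstInput (decodeFirstString firstInput)

-- ===== LEMMAS AND PROOFS =====

-- Common intermediate semantics: scan the brace-free prefix with an explicit token buffer.
def decodeSpec : List Char → List Char → List String × List String
  | buf, [] => ([], [String.ofList buf])
  | buf, c :: t =>
    if c = ':' then
      let r := decodeSpec [] t
      (String.ofList buf :: r.1, r.2)
    else if c = ',' then
      let r := decodeSpec [] t
      (r.1, String.ofList buf :: r.2)
    else decodeSpec (buf ++ [c]) t

-- clean single-character split, the shape both sides are reduced to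
def splitC (d : Char) : List Char → List (List Char)
  | [] => [[]]
  | c :: t => if c = d then [] :: splitC d t else (splitC d t).modifyHead (c :: ·)

theorem splitC_ne_nil (d : Char) (l : List Char) : splitC d l ≠ [] := by
  induction l with
  | nil => simp [splitC]
  | cons c t ih =>
    simp only [splitC]
    split
    · simp
    · intro h; exact ih (by simpa using List.modifyHead_eq_nil_iff.mp h)

theorem splitC_go (d : Char) :
    ∀ (fuel : Nat) (l cur acc : _), l.length < fuel →
      PySem.Chars.splitOn.go [d] fuel l cur acc
        = acc.reverse ++ (splitC d l).modifyHead (cur.reverse ++ ·) := by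
  intro fuel
  induction fuel with
  | zero => intro l cur acc h; omega
  | succ fuel ih =>
    intro l cur acc h
    match l with
    | [] => simp [PySem.Chars.splitOn.go, splitC]
    | c :: rest =>
      by_cases hc : c = d
      · subst hc
        have hpre : List.isPrefixOf [c] (c :: rest) = true := by simp [List.isPrefixOf]
        simp only [PySem.Chars.splitOn.go, hpre, if_pos]
        rw [ih _ _ _ (by simpa using Nat.lt_of_succ_lt_succ h)]
        simp [splitC]
        exact congrFun List.modifyHead_id _
      · have hpre : List.isPrefixOf [d] (c :: rest) = false := by
          simp [List.isPrefixOf]; exact fun hh => hc hh.symm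
        simp only [PySem.Chars.splitOn.go, hpre, Bool.false_eq_true, if_false]
        rw [ih _ _ _ (by simpa using Nat.lt_of_succ_lt_succ h)]
        simp only [splitC, if_neg hc, List.modifyHead_modifyHead]
        congr 2
        funext x
        simp

theorem splitOn_eq_splitC (d : Char) (l : List Char) :
    PySem.Chars.splitOn l [d] = splitC d l := by
  unfold PySem.Chars.splitOn
  rw [splitC_go d (l.length + 1) l [] [] (by omega)]
  simp
  exact congrFun List.modifyHead_id _

theorem splitC_no_sep {d : Char} {l : List Char} (h : d ∉ l) : splitC d l = [l] := by
  induction l with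
  | nil => rfl
  | cons c t ih =>
    simp only [List.mem_cons, not_or] at h
    simp [splitC, Ne.symm h.1, ih h.2]

theorem splitC_append_sep {d : Char} {pre : List Char} (rest : List Char) (h : d ∉ pre) :
    splitC d (pre ++ d :: rest) = pre :: splitC d rest := by
  induction pre with
  | nil => simp [splitC]
  | cons c t ih =>
    simp only [List.mem_cons, not_or] at h
    have hcd : ¬ c = d := fun hh => h.1 hh.symm
    simp [splitC, hcd, ih h.2]

-- find on a list containing '}' points at the brace-free prefix's length
theorem find_go_brace :
    ∀ (l : List Char) (k : Nat), '}' ∈ l →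
      PySem.Chars.find.go ['}'] l k = (k : Int) + (l.takeWhile (· ≠ '}')).length := by
  intro l
  induction l with
  | nil => intro k h; simp at h
  | cons c t ih =>
    intro k h
    by_cases hc : c = '}'
    · subst hc
      have hp : List.isPrefixOf ['}'] ('}' :: t) = true := by simp [List.isPrefixOf]
      simp [PySem.Chars.find.go, hp, List.takeWhile]
    · have hmem : '}' ∈ t := by
        rcases List.mem_cons.mp h with h1 | h1
        · exact absurd h1.symm hc
        · exact h1
      have hp : List.isPrefixOf ['}'] (c :: t) = false := by
        simp [List.isPrefixOf]; exact fun hh => hc hh.symm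
      simp only [PySem.Chars.find.go, hp, Bool.false_eq_true, if_false]
      rw [ih (k + 1) hmem]
      have hstep : (c :: t).takeWhile (· ≠ '}') = c :: t.takeWhile (· ≠ '}') := by
        simp [hc]
      rw [hstep]
      simp
      ring

theorem find_brace {cs : List Char} (h : '}' ∈ cs) :
    PySem.Chars.find cs ['}'] = ((cs.takeWhile (· ≠ '}')).length : Int) := by
  unfold PySem.Chars.find
  rw [find_go_brace cs 0 h]; simp

theorem takeWhile_eq_take (p : Char → Bool) (l : List Char) :
    l.takeWhile p = l.take (l.takeWhile p).length := by
  induction l with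
  | nil => rfl
  | cons c t ih =>
    by_cases h : p c = true
    · rw [List.takeWhile_cons_of_pos h, List.length_cons, List.take_succ_cons]
      exact congrArg _ ih
    · rw [List.takeWhile_cons_of_neg h]
      rfl

-- slice helpers for B (tokens[:-1] and tokens[-1])
theorem slice_neg_one {α : Type} (l : List α) :
    PySem.List.slice l none (some (-1)) = l.dropLast := by
  match l with
  | [] => rfl
  | x :: t =>
    simp only [PySem.List.slice, PySem.List.clampIdx, List.length_cons]
    norm_num
    split_ifs with h1
    · omega
    · simp [List.dropLast_eq_take]

theorem pyGet_neg_one {α : Type} (l : List α) (h : l ≠ []) :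
    PySem.List.pyGet? l (-1) = some (l.getLast h) := by
  simp only [PySem.List.pyGet?, PySem.List.pyIdx?]
  have hl : 0 < l.length := List.length_pos_iff.mpr h
  norm_num
  split_ifs with h1
  · show l[l.length - (1 : Int).toNat]? = some (l.getLast h)
    rw [show l.length - (1 : Int).toNat = l.length - 1 from rfl]
    rw [← List.getLast?_eq_getElem?, List.getLast?_eq_some_getLast h]
  · exact absurd hl (by omega)

-- the fold in B, flattened
theorem foldl_pair (f g : List Char → List String) (L : List (List Char)) (a b : List String) :
    L.foldl (fun acc part => (acc.1 ++ f part, acc.2 ++ g part)) (a, b)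
      = (a ++ L.flatMap f, b ++ L.flatMap g) := by
  induction L generalizing a b with
  | nil => simp
  | cons p t ih => simp [List.foldl_cons, ih]

-- B's per-part contributions
def fTok (part : List Char) : List String := (splitC ':' part).dropLast.map String.ofList
def gTok (part : List Char) : List String :=
  [String.ofList (((splitC ':' part).getLast?).getD [])]

-- getLast? skips a cons when the tail is nonempty
theorem getLast?_cons_ne_nil {α : Type} (b : α) {S : List α} (h : S ≠ []) :
    (b :: S).getLast? = S.getLast? := by
  cases S with
  | nil => exact absurd rfl h
  | cons x xs => simp [List.getLast?_cons_cons]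

-- B equals decodeSpec on any list (applied to the brace-free prefix)
theorem decodeSpec_eq_flat :
    ∀ (p buf : List Char), ':' ∉ buf → ',' ∉ buf →
      decodeSpec buf p
        = (((splitC ',' p).modifyHead (buf ++ ·)).flatMap fTok,
           ((splitC ',' p).modifyHead (buf ++ ·)).flatMap gTok) := by
  intro p
  induction p with
  | nil =>
    intro buf h1 h2
    simp [decodeSpec, splitC, fTok, gTok, splitC_no_sep h1]
  | cons c t ih =>
    intro buf h1 h2
    obtain ⟨h0, P', hP⟩ := List.exists_cons_of_ne_nil (splitC_ne_nil ',' t)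
    have ihr : decodeSpec [] t
        = ((splitC ',' t).flatMap fTok, (splitC ',' t).flatMap gTok) := by
      rw [ih [] (by simp) (by simp),
        show (fun x => ([] : List Char) ++ x) = id from rfl, List.modifyHead_id]
      rfl
    by_cases hc1 : c = ':'
    · subst hc1
      have hsplit : splitC ',' (':' :: t) = ((':' : Char) :: h0) :: P' := by
        simp [splitC, hP]
      have hS := splitC_ne_nil ':' h0
      have hfT : fTok (buf ++ ':' :: h0) = String.ofList buf :: fTok h0 := by
        unfold fTok
        rw [splitC_append_sep h0 h1, List.dropLast_cons_of_ne_nil hS]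
        simp
      have hgT : gTok (buf ++ ':' :: h0) = gTok h0 := by
        unfold gTok
        rw [splitC_append_sep h0 h1, getLast?_cons_ne_nil _ hS]
      have hM : List.modifyHead (fun x => buf ++ x) (splitC ',' (':' :: t))
          = (buf ++ ':' :: h0) :: P' := by rw [hsplit]; rfl
      have hL : decodeSpec buf (':' :: t)
          = (String.ofList buf :: (decodeSpec [] t).1, (decodeSpec [] t).2) := by
        simp [decodeSpec]
      rw [hL, ihr, hM, List.flatMap_cons, List.flatMap_cons, hfT, hgT, hP]
      simp
    · by_cases hc2 : c = ','
      · subst hc2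
        have hne : (',' : Char) ≠ ':' := by decide
        have hL : decodeSpec buf (',' :: t)
            = ((decodeSpec [] t).1, String.ofList buf :: (decodeSpec [] t).2) := by
          simp [decodeSpec, hne]
        have hsplit : splitC ',' (',' :: t) = [] :: splitC ',' t := by simp [splitC]
        have hM : List.modifyHead (fun x => buf ++ x) (splitC ',' (',' :: t))
            = buf :: splitC ',' t := by rw [hsplit]; simp
        rw [hL, ihr, hM, List.flatMap_cons, List.flatMap_cons]
        rw [show fTok buf = [] by simp [fTok, splitC_no_sep h1]]
        rw [show gTok buf = [String.ofList buf] by simp [gTok, splitC_no_sep h1]]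
        simp
      · have hb1 : ':' ∉ buf ++ [c] := by
          simp [h1]; exact fun hh => hc1 hh.symm
        have hb2 : ',' ∉ buf ++ [c] := by
          simp [h2]; exact fun hh => hc2 hh.symm
        have hL : decodeSpec buf (c :: t) = decodeSpec (buf ++ [c]) t := by
          simp only [decodeSpec, if_neg hc1, if_neg hc2]
        have hsplit : splitC ',' (c :: t) = (splitC ',' t).modifyHead (c :: ·) := by
          simp [splitC, hc2]
        rw [hL, ih (buf ++ [c]) hb1 hb2, hsplit, List.modifyHead_modifyHead]
        congr 2 <;> · congr 1; funext x; simp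

-- A's loop equals decodeSpec on the suffix
theorem loopA_eq (cs : List Char) :
    ∀ (fuel initI curI : Nat) (item value : List String),
      initI ≤ curI → curI ≤ cs.length → '}' ∈ cs.drop curI → cs.length - curI < fuel →
      decodeFirstStringLoop cs fuel initI curI item value
        = (item ++ (decodeSpec ((cs.drop initI).take (curI - initI))
              ((cs.drop curI).takeWhile (· ≠ '}'))).1,
           value ++ (decodeSpec ((cs.drop initI).take (curI - initI))
              ((cs.drop curI).takeWhile (· ≠ '}'))).2) := by
  intro fuel
  induction fuel with
  | zero => intro initI curI item value h1 h2 h3 h4; omega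
  | succ fuel ih =>
    intro initI curI item value h1 h2 h3 h4
    have hcur : curI < cs.length := by
      by_contra hcon
      have : cs.drop curI = [] := List.drop_eq_nil_of_le (by omega)
      rw [this] at h3; simp at h3
    have hget : PySem.List.pyGet? cs ((curI : Nat) : Int) = some cs[curI] := by
      rw [PySem.List.pyGet?_natCast, List.getElem?_eq_getElem hcur]
    have hdrop : cs.drop curI = cs[curI] :: cs.drop (curI + 1) :=
      (List.getElem_cons_drop hcur).symm
    have hslice : PySem.List.slice cs (some (initI : Int)) (some (curI : Int))
        = (cs.drop initI).take (curI - initI) := PySem.List.slice_natCast cs initI curI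
    by_cases hc0 : cs[curI] = '}'
    · simp only [decodeFirstStringLoop, hget, if_pos hc0, hslice]
      rw [hdrop, hc0]
      simp [decodeSpec]
    · have hmem' : '}' ∈ cs.drop (curI + 1) := by
        rw [hdrop] at h3
        rcases List.mem_cons.mp h3 with hh | hh
        · exact absurd hh.symm hc0
        · exact hh
      have htw : (cs.drop curI).takeWhile (· ≠ '}')
          = cs[curI] :: (cs.drop (curI + 1)).takeWhile (· ≠ '}') := by
        rw [hdrop, List.takeWhile_cons_of_pos (by simp [hc0])]
      by_cases hc1 : cs[curI] = ':'
      · simp only [decodeFirstStringLoop, hget, if_neg hc0, if_pos hc1, hslice]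
        rw [ih (curI + 1) (curI + 1) _ _ (le_refl _) hcur hmem' (by omega)]
        rw [htw, hc1]
        simp [decodeSpec]
      · by_cases hc2 : cs[curI] = ','
        · simp only [decodeFirstStringLoop, hget, if_neg hc0, if_neg hc1, if_pos hc2, hslice]
          rw [ih (curI + 1) (curI + 1) _ _ (le_refl _) hcur hmem' (by omega)]
          rw [htw, hc2]
          have hne : (',' : Char) ≠ ':' := by decide
          simp [decodeSpec, hne]
        · simp only [decodeFirstStringLoop, hget, if_neg hc0, if_neg hc1, if_neg hc2]
          rw [ih initI (curI + 1) _ _ (by omega) hcur hmem' (by omega)]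
          rw [htw]
          have hbuf : (cs.drop initI).take (curI + 1 - initI)
              = (cs.drop initI).take (curI - initI) ++ [cs[curI]] := by
            have : curI + 1 - initI = (curI - initI) + 1 := by omega
            rw [this, List.take_add_one]
            congr 1
            rw [List.getElem?_drop]
            rw [show initI + (curI - initI) = curI by omega,
              List.getElem?_eq_getElem hcur]
            rfl
          rw [hbuf]
          simp only [decodeSpec, if_neg hc1, if_neg hc2]

-- ===== VERDICT (by name: the statement is the Claim_ definition above) =====
theorem decodeFirstString_spec : Claim_equal_decodeFirstString := by
  intro s _ hpre
  unfold Spec_decodeFirstString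
  have hmem : '}' ∈ s.toList := hpre
  set cs := s.toList with hcs
  set p := cs.takeWhile (· ≠ '}') with hp
  -- A's side
  have hA : decodeFirstString s = decodeSpec [] p := by
    unfold decodeFirstString
    rw [loopA_eq cs (cs.length + 1) 0 0 [] [] (le_refl 0) (Nat.zero_le _)
      (by simpa using hmem) (by omega)]
    simp only [List.drop_zero, Nat.sub_zero, List.take_zero, List.nil_append, ← hp]
  -- B's side
  have hpre_eq : PySem.List.slice cs none (some (PySem.Chars.find cs ['}'])) = p := by
    rw [find_brace hmem, PySem.List.slice_to cs (by positivity)]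
    rw [show ((p.length : Int)).toNat = p.length from rfl]
    exact (takeWhile_eq_take _ cs).symm
  have hfun : (fun (acc : List String × List String) part =>
        (acc.1 ++ (PySem.List.slice (PySem.Chars.splitOn part [':']) none (some (-1))).map
            String.ofList,
         acc.2 ++ [String.ofList
            ((PySem.List.pyGet? (PySem.Chars.splitOn part [':']) (-1)).getD [])]))
      = fun (acc : List String × List String) part =>
          (acc.1 ++ fTok part, acc.2 ++ gTok part) := by
    funext acc part
    have hne := splitC_ne_nil ':' part
    simp only [splitOn_eq_splitC, slice_neg_one, pyGet_neg_one _ hne,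
      Option.getD_some, fTok, gTok, List.getLast?_eq_some_getLast hne]
  have hB : decodeFirstString_alt s
      = ((splitC ',' p).flatMap fTok, (splitC ',' p).flatMap gTok) := by
    show (PySem.Chars.splitOn
        (PySem.List.slice cs none (some (PySem.Chars.find cs ['}']))) [',']).foldl
        (fun (acc : List String × List String) part =>
          (acc.1 ++ (PySem.List.slice (PySem.Chars.splitOn part [':']) none (some (-1))).map
              String.ofList,
           acc.2 ++ [String.ofList
              ((PySem.List.pyGet? (PySem.Chars.splitOn part [':']) (-1)).getD [])]))
        ([], []) = _
    rw [hpre_eq, hfun, splitOn_eq_splitC, foldl_pair]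
    simp
  rw [hA, hB, decodeSpec_eq_flat p [] (by simp) (by simp)]
  rw [show (fun x => ([] : List Char) ++ x) = id from rfl, List.modifyHead_id]
  rfl
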